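-- pv_equiv track=rewrite | github.com/distichum/bookshift | bookshift.py | section_range_count
-- ===== SOURCE A (Python) =====
-- def section_range_count(data):
--     """Create columns for either section or range numbering."""
--     sr_count = []
--     incrementer = 0
--     for line_data in data:
--         if line_data.strip() == '':
--             sr_count.append(incrementer)
--         else:
--             incrementer = incrementer + 1
--             sr_count.append(incrementer)
--     return sr_count
-- ===== SOURCE B (Python) =====
-- def _bisect_right(a, x):
--     lo, hi = 0, len(a)
--     while lo < hi:
--         mid = (lo + hi) // 2
--         if x < a[mid]:
--             hi = mid
--         else:
--             lo = mid + 1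
--     return lo
--
--
-- def section_range_count(data):
--     """Create columns for either section or range numbering."""
--     marks = [i for i in range(len(data)) if data[i].strip() != '']
--     return [_bisect_right(marks, i) for i in range(len(data))]
-- ===== Notes on version B (the rewrite author's own statement) =====
-- stated objective: alternative
-- what changed: Instead of a running counter over the lines, B builds the sorted table of non-blank line indices and answers each position by binary search (bisect_right) into that table.
import Mathlib
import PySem

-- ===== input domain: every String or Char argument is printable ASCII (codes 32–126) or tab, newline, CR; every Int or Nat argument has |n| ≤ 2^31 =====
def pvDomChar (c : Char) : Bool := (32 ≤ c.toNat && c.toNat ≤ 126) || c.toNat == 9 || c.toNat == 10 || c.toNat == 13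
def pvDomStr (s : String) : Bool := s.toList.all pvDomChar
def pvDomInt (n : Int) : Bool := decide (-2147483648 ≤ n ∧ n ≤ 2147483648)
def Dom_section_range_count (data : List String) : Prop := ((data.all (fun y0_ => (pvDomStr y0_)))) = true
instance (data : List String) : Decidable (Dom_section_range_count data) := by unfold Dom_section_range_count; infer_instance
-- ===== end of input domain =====

-- B replaces A's running-counter loop by a table of non-blank line indices queried per position
-- with a hand-rolled bisect_right binary search (alternative algorithm, not faster).

-- ===== PORT A =====
-- loop state: (sr_count so far, incrementer)
def srcStepA (st : List Int × Int) (line_data : String) : List Int × Int :=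
  if PySem.Str.strip line_data == "" then (st.1 ++ [st.2], st.2)
  else (st.1 ++ [st.2 + 1], st.2 + 1)

def section_range_count (data : List String) : List Int :=
  (data.foldl srcStepA ([], 0)).1

-- ===== PORT B =====
-- _bisect_right's while loop, recursion on hi - lo
def srcBisect (a : List Nat) (x : Nat) (lo hi : Nat) : Nat :=
  if _h : lo < hi then
    if x < a.getD ((lo + hi) / 2) 0 then srcBisect a x lo ((lo + hi) / 2)
    else srcBisect a x ((lo + hi) / 2 + 1) hi
  else lo
termination_by hi - lo
decreasing_by all_goals omega

def section_range_count_alt (data : List String) : List Int :=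
  let marks := (List.range data.length).filter
    (fun i => PySem.Str.strip (data.getD i "") != "")
  (List.range data.length).map (fun i => (srcBisect marks i 0 marks.length : Int))

-- ===== PRECONDITION & SPEC =====
def Spec_section_range_count (data : List String) (out : List Int) : Prop := out = section_range_count_alt data
instance (data : List String) (out : List Int) : Decidable (Spec_section_range_count data out) := by unfold Spec_section_range_count; infer_instance

-- ===== CLAIM (what is proved, stated in full; the proofs are below) =====
def Claim_equal_section_range_count : Prop := ∀ (data : List String), Dom_section_range_count data → Spec_section_range_count data (section_range_count data)

-- ===== LEMMAS AND PROOFS =====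

-- the non-blank predicate
def srcP (s : String) : Bool := PySem.Str.strip s != ""

-- A's loop produces, at each position j, the count of non-blank lines in the first j+1 lines.
theorem srcA_loop (data : List String) (acc : List Int) (inc : Int) :
    data.foldl srcStepA (acc, inc) =
      (acc ++ (List.range data.length).map
          (fun j => inc + ((data.take (j+1)).countP srcP : Int)),
        inc + (data.countP srcP : Int)) := by
  induction data generalizing acc inc with
  | nil => simp
  | cons l rest ih =>
    simp only [List.foldl_cons, srcStepA]
    by_cases h : PySem.Str.strip l == ""
    · have hp : srcP l = false := by simp [srcP, bne, h]
      rw [if_pos h, ih]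
      simp only [Prod.mk.injEq, List.length_cons, List.range_succ_eq_map,
        List.map_cons, List.map_map, List.countP_cons, hp]
      refine ⟨?_, by push_cast; ring⟩
      rw [List.append_assoc]
      simp only [List.take_succ_cons, List.countP_cons, hp, List.take_zero,
        List.countP_nil, Function.comp]
      push_cast
      simp [List.singleton_append]
    · have hp : srcP l = true := by simp [srcP, bne, h]
      rw [if_neg h, ih]
      simp only [Prod.mk.injEq, List.length_cons, List.range_succ_eq_map,
        List.map_cons, List.map_map, List.countP_cons, hp]
      refine ⟨?_, by push_cast; ring⟩
      rw [List.append_assoc]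
      simp only [List.take_succ_cons, List.countP_cons, hp, List.take_zero,
        List.countP_nil, Function.comp]
      push_cast
      refine congrArg (acc ++ ·) ?_
      simp only [List.singleton_append, List.cons.injEq]
      refine ⟨trivial, List.map_congr_left (fun j _ => ?_)⟩
      simp only [Function.comp_apply, Nat.succ_eq_add_one]
      ring

-- monotone getD access from Pairwise (· ≤ ·)
theorem srcGetD_mono (a : List Nat) (hs : a.Pairwise (· ≤ ·)) (i j : Nat)
    (hij : i ≤ j) (hj : j < a.length) : a.getD i 0 ≤ a.getD j 0 := by
  have hi : i < a.length := lt_of_le_of_lt hij hj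
  rw [List.getD_eq_getElem a 0 hi, List.getD_eq_getElem a 0 hj]
  rcases Nat.lt_or_ge i j with hlt | hge
  · exact (List.pairwise_iff_getElem.mp hs) i j hi hj hlt
  · have : i = j := Nat.le_antisymm hij hge
    subst this; exact le_refl _

-- if everything before lo is ≤ x and everything from lo on is > x, countP (≤ x) = lo
theorem srcCountP_boundary (a : List Nat) (x : Nat) :
    ∀ (lo : Nat), lo ≤ a.length →
    (∀ k, k < lo → a.getD k 0 ≤ x) →
    (∀ k, lo ≤ k → k < a.length → x < a.getD k 0) →
    a.countP (fun m => m ≤ x) = lo := by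
  induction a with
  | nil => intro lo hlo _ _; simpa using Nat.le_antisymm (by simpa using hlo) (Nat.zero_le _) |>.symm
  | cons m t ih =>
    intro lo hlo h1 h2
    cases lo with
    | zero =>
      have hm : x < m := by simpa using h2 0 (Nat.zero_le _) (by simp)
      simp only [List.countP_cons]
      have ht : t.countP (fun m => m ≤ x) = 0 := by
        rw [List.countP_eq_zero]
        intro y hy
        obtain ⟨k, hk, rfl⟩ := List.mem_iff_getElem.mp hy
        have := h2 (k+1) (Nat.zero_le _) (by simpa using Nat.succ_lt_succ hk)
        rw [List.getD_cons_succ, List.getD_eq_getElem t 0 hk] at this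
        simpa using this
      simp [ht, Nat.not_le.mpr hm]
    | succ lo' =>
      have hm : m ≤ x := by simpa using h1 0 (Nat.succ_pos _)
      have ht : t.countP (fun m => m ≤ x) = lo' := by
        refine ih lo' (by simpa using hlo) (fun k hk => ?_) (fun k hk hk' => ?_)
        · have := h1 (k+1) (Nat.succ_lt_succ hk)
          rwa [List.getD_cons_succ] at this
        · have := h2 (k+1) (Nat.succ_le_succ hk) (by simpa using Nat.succ_lt_succ hk')
          rwa [List.getD_cons_succ] at this
      simp [List.countP_cons, ht, hm]

-- binary search correctness on a sorted list
theorem srcBisect_correct (a : List Nat) (x : Nat) (hs : a.Pairwise (· ≤ ·)) :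
    ∀ (n lo hi : Nat), hi - lo ≤ n → lo ≤ hi → hi ≤ a.length →
    (∀ k, k < lo → a.getD k 0 ≤ x) →
    (∀ k, hi ≤ k → k < a.length → x < a.getD k 0) →
    srcBisect a x lo hi = a.countP (fun m => m ≤ x) := by
  intro n
  induction n with
  | zero =>
    intro lo hi hn hlh hha h1 h2
    have : lo = hi := by omega
    subst this
    rw [srcBisect, dif_neg (by omega)]
    exact (srcCountP_boundary a x lo hha h1 (fun k hk hk' => h2 k hk hk')).symm
  | succ n ih =>
    intro lo hi hn hlh hha h1 h2
    rw [srcBisect]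
    by_cases hlt : lo < hi
    · rw [dif_pos hlt]
      by_cases hx : x < a.getD ((lo + hi) / 2) 0
      · rw [if_pos hx]
        refine ih lo ((lo + hi) / 2) (by omega) (by omega) (by omega) h1
          (fun k hk hk' => ?_)
        exact lt_of_lt_of_le hx (srcGetD_mono a hs _ k hk hk')
      · rw [if_neg hx]
        refine ih ((lo + hi) / 2 + 1) hi (by omega) (by omega) hha
          (fun k hk => ?_) h2
        have hk' : k ≤ (lo + hi) / 2 := by omega
        exact le_trans (srcGetD_mono a hs k _ hk' (by omega)) (Nat.not_lt.mp hx)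
    · rw [dif_neg hlt]
      have : lo = hi := by omega
      subst this
      exact (srcCountP_boundary a x lo hha h1 (fun k hk hk' => h2 k hk hk')).symm

-- take as a map over range
theorem srcTake_eq_map_range (data : List String) (m : Nat) (hm : m ≤ data.length) :
    data.take m = (List.range m).map (fun j => data.getD j "") := by
  apply List.ext_getElem
  · simp [hm]
  · intro k h1 h2
    have hk : k < m := by simpa using h2
    have hkd : k < data.length := lt_of_lt_of_le hk hm
    simp [List.getElem_take, List.getD, List.getElem?_eq_getElem hkd]

-- ===== VERDICT (by name: the statement is the Claim_ definition above) =====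
theorem section_range_count_spec : Claim_equal_section_range_count := by
  intro data _
  unfold Spec_section_range_count section_range_count section_range_count_alt
  rw [srcA_loop]
  simp only [List.nil_append]
  refine List.map_congr_left (fun i hi => ?_)
  have hin : i < data.length := List.mem_range.mp hi
  have hsorted : ((List.range data.length).filter
      (fun i => PySem.Str.strip (data.getD i "") != "")).Pairwise (· ≤ ·) :=
    (List.pairwise_lt_range.filter _).imp (fun h => Nat.le_of_lt h)
  have hb := srcBisect_correct ((List.range data.length).filter
      (fun i => PySem.Str.strip (data.getD i "") != "")) i hsorted
      ((List.range data.length).filter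
      (fun i => PySem.Str.strip (data.getD i "") != "")).length 0
      ((List.range data.length).filter
      (fun i => PySem.Str.strip (data.getD i "") != "")).length
      (by omega) (Nat.zero_le _) (le_refl _)
      (fun k hk => absurd hk (Nat.not_lt_zero k)) (fun k hk hk' => absurd hk' (by omega))
  rw [hb]
  have hc : ((List.range data.length).filter
        (fun i => PySem.Str.strip (data.getD i "") != "")).countP (fun m => m ≤ i)
      = (data.take (i+1)).countP srcP := by
    rw [List.countP_filter]
    have hsplit : data.length = (i+1) + (data.length - (i+1)) := by omega
    rw [hsplit, List.range_add, List.countP_append]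
    have h2 : ((List.range (data.length-(i+1))).map (fun t => (i+1) + t)).countP
        (fun m => decide (m ≤ i) && (PySem.Str.strip (data.getD m "") != "")) = 0 := by
      rw [List.countP_eq_zero]
      intro m hm
      obtain ⟨t, _, rfl⟩ := List.mem_map.mp hm
      simp only [Bool.and_eq_true, decide_eq_true_eq, not_and]
      intro hle
      omega
    rw [h2, Nat.add_zero]
    have h1 : (List.range (i+1)).countP
          (fun m => decide (m ≤ i) && (PySem.Str.strip (data.getD m "") != ""))
        = (List.range (i+1)).countP (fun m => PySem.Str.strip (data.getD m "") != "") := by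
      apply List.countP_congr
      intro m hm
      have : m ≤ i := by simpa [Nat.lt_succ_iff] using List.mem_range.mp hm
      simp [this]
    rw [h1, srcTake_eq_map_range data (i+1) (by omega), List.countP_map]
    rfl
  rw [hc]
  push_cast
  ring
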